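-- pv_equiv track=rewrite | github.com/parlaungan026/jawaban_logic_development | hitung.py | hitung
-- ===== SOURCE A (Python) =====
-- def hitung(str):
--     n = {}
--
--     for char in str:
--         if char.isalpha():
--             if char in n:
--                 n[char] += 1
--             else:
--                 n[char] = 1
--
--     sorted_counts = {k: v for k, v in sorted(n.items(), key=lambda item: item[0])}
--
--     return sorted_counts
-- ===== SOURCE B (Python) =====
-- def hitung(str):
--     chars = sorted([c for c in str if c.isalpha()])
--     out = {}
--     i = 0
--     n = len(chars)
--     while i < n:
--         j = i + 1
--         while j < n and chars[j] == chars[i]: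
--             j += 1
--         out[chars[i]] = j - i
--         i = j
--     return out
-- ===== Notes on version B (the rewrite author's own statement) =====
-- stated objective: alternative
-- what changed: B sorts the filtered alphabetic characters first and counts consecutive runs in one scan, instead of accumulating counts in a dict and then sorting its items.
import Mathlib
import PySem

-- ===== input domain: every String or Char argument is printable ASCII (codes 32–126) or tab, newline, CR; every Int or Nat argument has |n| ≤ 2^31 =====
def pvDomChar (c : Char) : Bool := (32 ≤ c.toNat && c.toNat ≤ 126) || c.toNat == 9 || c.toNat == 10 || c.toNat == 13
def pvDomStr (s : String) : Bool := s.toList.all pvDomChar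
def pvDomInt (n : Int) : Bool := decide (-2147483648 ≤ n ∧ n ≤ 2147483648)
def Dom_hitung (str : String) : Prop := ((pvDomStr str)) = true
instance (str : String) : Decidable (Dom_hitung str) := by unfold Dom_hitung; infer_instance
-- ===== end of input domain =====

-- B sorts the filtered alphabetic characters first and counts consecutive runs in one
-- scan, instead of accumulating counts in a dict and then sorting its items (objective: alternative).

-- ===== PORT A =====
-- count into a dict, then sort the items by key
def hitung (str : String) : List (String × Int) :=
  (PySem.List.sorted
      ((str.toList.foldl
          (fun d char =>
            if PySem.Chars.isalpha char then
              if d.contains char then d.insert char (d.getD char 0 + 1)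
              else d.insert char 1
            else d)
          PySem.Dict.empty).items)
      (fun item => item.1) false).map (fun kv => (String.ofList [kv.1], kv.2))

-- ===== PORT B =====
-- run-length count over the sorted character list (the nested while loops of Source B:
-- the inner 'while chars[j] == chars[i]' scan is takeWhile/dropWhile of the run)
def pvRuns : List Char → List (Char × Int)
  | [] => []
  | c :: rest =>
      (c, 1 + ((rest.takeWhile (fun x => x == c)).length : Int)) ::
        pvRuns (rest.dropWhile (fun x => x == c))
  termination_by s => s.length
  decreasing_by
    have := List.length_dropWhile_le (fun x => x == c) rest
    simp only [List.length_cons]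
    omega

def hitung_alt (str : String) : List (String × Int) :=
  (pvRuns (PySem.List.sorted (str.toList.filter (fun c => PySem.Chars.isalpha c))
      (fun c => c) false)).map (fun kv => (String.ofList [kv.1], kv.2))

-- ===== PRECONDITION & SPEC =====
def Spec_hitung (str : String) (out : List (String × Int)) : Prop := out = hitung_alt str
instance (str : String) (out : List (String × Int)) : Decidable (Spec_hitung str out) := by unfold Spec_hitung; infer_instance

-- ===== CLAIM (what is proved, stated in full; the proofs are below) =====
def Claim_equal_hitung : Prop := ∀ (str : String), Dom_hitung str → Spec_hitung str (hitung str)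

-- ===== LEMMAS AND PROOFS =====

-- on a ≤-sorted list, the head of a run does not reappear after the run is dropped
lemma pv_not_mem_drop (c : Char) (rest : List Char)
    (h : (c :: rest).Pairwise (· ≤ ·)) :
    c ∉ rest.dropWhile (fun x => x == c) := by
  intro hc
  set d := rest.dropWhile (fun x => x == c) with hd
  have hdne : d ≠ [] := by intro h0; rw [h0] at hc; exact (List.not_mem_nil) hc
  cases hdd : d with
  | nil => exact hdne hdd
  | cons e d' =>
    have hdl : rest.dropWhile (fun x => x == c) = e :: d' := by rw [← hd, hdd]
    have hhead : (fun x => x == c) ((rest.dropWhile (fun x => x == c)).head (by rw [hdl]; simp)) = false :=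
      List.head_dropWhile_not (fun x => x == c) _
    simp only [hdl, List.head_cons] at hhead
    rw [beq_eq_false_iff_ne] at hhead
    have hsub : d.Sublist rest := List.dropWhile_sublist _
    have hle : ∀ x ∈ rest, c ≤ x := fun x hx => List.rel_of_pairwise_cons h hx
    have hce : c ≤ e := hle e (hsub.mem (by rw [hdd]; simp))
    rw [hdd] at hc
    rcases List.mem_cons.mp hc with h1 | h1
    · exact hhead h1.symm
    · -- c appears later in the run's tail: e ≤ c and c ≤ e force e = c
      have hpd : (e :: d').Pairwise (· ≤ ·) := by
        have := (List.Pairwise.sublist hsub (List.Pairwise.of_cons h))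
        rwa [hdd] at this
      have hec : e ≤ c := List.rel_of_pairwise_cons hpd h1
      exact hhead (le_antisymm hec hce)

-- characterisation of the run-length list on a ≤-sorted list: its pairs are exactly (k, count k)
lemma pvRuns_mem (s : List Char) (hs : s.Pairwise (· ≤ ·)) (k : Char) (v : Int) :
    (k, v) ∈ pvRuns s ↔ k ∈ s ∧ v = (s.count k : Int) := by
  fun_induction pvRuns s with
  | case1 => simp
  | case2 c rest ih =>
    set t := rest.takeWhile (fun x => x == c) with htdef
    set d := rest.dropWhile (fun x => x == c) with hddef
    have hrest : t ++ d = rest := List.takeWhile_append_dropWhile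
    have ht : ∀ x ∈ t, x = c := by
      intro x hx
      have := List.mem_takeWhile_imp hx
      simpa using this
    have hcd : c ∉ d := pv_not_mem_drop c rest hs
    have hdp : d.Pairwise (· ≤ ·) :=
      List.Pairwise.sublist (List.dropWhile_sublist _) (List.Pairwise.of_cons hs)
    rw [List.mem_cons, ih hdp]
    by_cases hk : k = c
    · subst hk
      have hcnt : (k :: rest).count k = 1 + t.length := by
        rw [← hrest]
        simp only [List.count_cons, List.count_append]
        have h1 : t.count k = t.length := List.count_eq_length.mpr (fun b hb => (ht b hb).symm)
        have h2 : d.count k = 0 := List.count_eq_zero.mpr hcd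
        simp [h1, h2]
        omega
      constructor
      · rintro (h1 | ⟨h1, _⟩)
        · rw [Prod.mk.injEq] at h1
          obtain ⟨-, h2⟩ := h1
          refine ⟨List.mem_cons_self, ?_⟩
          rw [hcnt]; push_cast; omega
        · exact absurd h1 hcd
      · rintro ⟨-, hv⟩
        left
        rw [hcnt] at hv; push_cast at hv
        simp [hv]
    · have hkt : k ∉ t := fun hx => hk (ht k hx)
      have hck : ¬ c = k := fun h => hk h.symm
      have hcnt : (c :: rest).count k = d.count k := by
        rw [← hrest]
        simp only [List.count_cons, List.count_append]
        have h1 : t.count k = 0 := List.count_eq_zero.mpr hkt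
        simp [h1, hck]
      have hmem : k ∈ c :: rest ↔ k ∈ d := by
        rw [← hrest]
        simp only [List.mem_cons, List.mem_append]
        constructor
        · rintro (h1 | h1 | h1)
          · exact absurd h1 hk
          · exact absurd h1 hkt
          · exact h1
        · exact fun h1 => Or.inr (Or.inr h1)
      rw [hcnt, ← hmem]
      constructor
      · rintro (h1 | h1)
        · exact absurd (congrArg Prod.fst h1) hk
        · exact h1
      · exact fun h1 => Or.inr h1

-- on a ≤-sorted list the run keys are strictly increasing
lemma pvRuns_keys_lt (s : List Char) (hs : s.Pairwise (· ≤ ·)) :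
    (pvRuns s).Pairwise (fun a b => a.1 < b.1) := by
  fun_induction pvRuns s with
  | case1 => simp
  | case2 c rest ih =>
    have hdp : (rest.dropWhile (fun x => x == c)).Pairwise (· ≤ ·) :=
      List.Pairwise.sublist (List.dropWhile_sublist _) (List.Pairwise.of_cons hs)
    refine List.Pairwise.cons ?_ (ih hdp)
    intro p hp
    have hkd : p.1 ∈ rest.dropWhile (fun x => x == c) :=
      ((pvRuns_mem _ hdp p.1 p.2).mp (by simpa using hp)).1
    have hle : c ≤ p.1 :=
      List.rel_of_pairwise_cons hs ((List.dropWhile_sublist _).mem hkd)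
    have hne : p.1 ≠ c := fun h => (pv_not_mem_drop c rest hs) (h ▸ hkd)
    exact lt_of_le_of_ne hle (Ne.symm hne)

-- ===== VERDICT (by name: the statement is the Claim_ definition above) =====
theorem hitung_spec : Claim_equal_hitung := by
  intro str _
  unfold Spec_hitung hitung hitung_alt
  -- Step 1: A's dict-building fold is Counter of the filtered character list
  rw [PySem.List.foldl_if_eq_foldl_filter]
  rw [PySem.List.foldl_congr_mem _ _ (fun d x => d.insert x (d.getD x 0 + 1)) _ ?hcongr]
  case hcongr =>
    intro d x _
    by_cases h : d.contains x
    · simp [h]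
    · simp only [Bool.not_eq_true] at h
      simp [h, PySem.Dict.getD_of_not_contains d 0 h]
  rw [PySem.Dict.foldl_insert_getD_add_one_eq_counter, PySem.Dict.items_counter]
  -- Step 2: the sorted items list is exactly the run-length list of the sorted characters
  congr 1
  set l := str.toList.filter (fun c => PySem.Chars.isalpha c) with hl
  set s := PySem.List.sorted l (fun c => c) false with hsdef
  have hsp : s.Pairwise (· ≤ ·) := PySem.List.sorted_pairwise l (fun c => c)
  have hperm : s.Perm l := PySem.List.sorted_perm l (fun c => c) false
  apply PySem.List.sorted_eq_of_perm_of_pairwise_lt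
  · -- the run-length list is a permutation of the counter's items
    have hnd1 : (pvRuns s).Nodup :=
      (pvRuns_keys_lt s hsp).imp (fun h heq => absurd (heq ▸ h) (lt_irrefl _))
    have hnd2 : ((PySem.Set.ofList l).map (fun k => (k, (l.count k : Int)))).Nodup :=
      (PySem.Set.nodup_ofList l).map (fun a b h => congrArg Prod.fst h)
    refine (List.perm_ext_iff_of_nodup hnd1 hnd2).mpr ?_
    rintro ⟨k, v⟩
    rw [pvRuns_mem s hsp k v, List.mem_map]
    constructor
    · rintro ⟨hk, hv⟩
      refine ⟨k, (PySem.Set.mem_ofList l k).mpr (hperm.mem_iff.mp hk), ?_⟩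
      rw [hperm.count_eq] at hv
      simp [hv]
    · rintro ⟨a, ha, heq⟩
      injection heq with h1 h2
      subst h1
      exact ⟨hperm.mem_iff.mpr ((PySem.Set.mem_ofList l a).mp ha),
        by rw [hperm.count_eq]; exact h2.symm⟩
  · exact pvRuns_keys_lt s hsp
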